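-- pv_equiv track=rewrite | github.com/1def/rasch1def | app/core/cleaning.py | _pick_best_block
-- ===== SOURCE A (Python) =====
-- from typing import Any, List, Optional, Sequence, Tuple
--
-- def _pick_best_block(candidate_cols: List[int], target_min: int = 35, target_max: int = 55) -> List[int]:
--     if not candidate_cols:
--         return []
--     # form contiguous blocks
--     blocks: List[List[int]] = []
--     cur: List[int] = [candidate_cols[0]]
--     for j in candidate_cols[1:]:
--         if j == cur[-1] + 1:
--             cur.append(j)
--         else:
--             blocks.append(cur)
--             cur = [j]
--     blocks.append(cur)
--     # prefer block within [target_min, target_max]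
--     def score(block: List[int]) -> Tuple[int, int]:
--         ln = len(block)
--         # primary: distance from range
--         if ln < target_min:
--             dist = target_min - ln
--         elif ln > target_max:
--             dist = ln - target_max
--         else:
--             dist = 0
--         # secondary: longer is better
--         return (dist, -ln)
--     blocks.sort(key=score)
--     best = blocks[0]
--     # trim if longer than max
--     if len(best) > target_max:
--         best = best[:target_max]
--     # extend if shorter by merging neighbors (simple)
--     return best
-- ===== SOURCE B (Python) =====
-- def _pick_best_block(candidate_cols, target_min=35, target_max=55):
--     if not candidate_cols:
--         return []
--
--     def score(ln):
--         if ln < target_min: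
--             return (target_min - ln, -ln)
--         if ln > target_max:
--             return (ln - target_max, -ln)
--         return (0, -ln)
--
--     def better(ln, best):
--         # strictly better than the best run seen so far (keeps the earliest on ties)
--         return best is None or score(ln) < score(best[1])
--
--     best = None
--     start, length = candidate_cols[0], 1
--     for j in candidate_cols[1:]:
--         if j == start + length:
--             length += 1
--         else:
--             if better(length, best):
--                 best = (start, length)
--             start, length = j, 1
--     if better(length, best):
--         best = (start, length)
--
--     start, length = best
--     block = list(range(start, start + length))
--     if length > target_max:
--         block = block[:target_max]
--     return block
-- ===== Notes on version B (the rewrite author's own statement) =====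
-- stated objective: alternative
-- what changed: Replaces A's materialised list-of-blocks plus stable sort-by-score with a single pass over candidate_cols that tracks the current run as (start, length) and keeps the first strictly-better-scoring run, never building the blocks or the sorted list.
import Mathlib
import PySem

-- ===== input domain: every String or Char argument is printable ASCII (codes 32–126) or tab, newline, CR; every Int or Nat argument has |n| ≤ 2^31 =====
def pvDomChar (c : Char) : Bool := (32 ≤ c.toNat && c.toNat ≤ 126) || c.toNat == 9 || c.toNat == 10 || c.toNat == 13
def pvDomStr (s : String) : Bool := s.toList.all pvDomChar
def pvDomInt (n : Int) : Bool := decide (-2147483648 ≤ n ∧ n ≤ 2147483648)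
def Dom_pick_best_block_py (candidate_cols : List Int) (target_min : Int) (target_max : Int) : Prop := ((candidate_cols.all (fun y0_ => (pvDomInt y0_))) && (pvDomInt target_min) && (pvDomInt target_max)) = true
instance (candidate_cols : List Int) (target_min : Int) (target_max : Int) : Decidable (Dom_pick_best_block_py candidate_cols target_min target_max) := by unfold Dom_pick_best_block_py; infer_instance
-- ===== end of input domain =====

-- B replaces A's materialised block list + stable sort-by-score with a single pass keeping the best (start,length) run; return values proved equal.

-- ===== PORT A =====
-- A's nested 'def score(block)', as a helper over the block list
def pbbScoreBlk (target_min target_max : Int) (block : List Int) : Int × Int :=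
  let ln : Int := block.length
  let dist : Int :=
    if ln < target_min then target_min - ln
    else if ln > target_max then ln - target_max
    else 0
  (dist, -ln)

-- A's loop body: append j to cur if it extends it (cur[-1] via pyGet?; cur is never empty on reachable states), else close cur
def pbbStepA (st : List (List Int) × List Int) (j : Int) : List (List Int) × List Int :=
  if j = (PySem.List.pyGet? st.2 (-1)).getD 0 + 1 then (st.1, st.2 ++ [j])
  else (st.1 ++ [st.2], [j])

def pick_best_block_py (candidate_cols : List Int) (target_min : Int) (target_max : Int) : List Int :=
  match candidate_cols with
  | [] => []
  | c0 :: rest =>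
    let st := rest.foldl pbbStepA (([] : List (List Int)), [c0])
    let blocks := st.1 ++ [st.2]
    let sortedBlocks := PySem.List.sorted2 blocks
      (fun b => (pbbScoreBlk target_min target_max b).1)
      (fun b => (pbbScoreBlk target_min target_max b).2)
    let best := (PySem.List.pyGet? sortedBlocks 0).getD []
    if (best.length : Int) > target_max then PySem.List.slice best none (some target_max)
    else best


-- ===== PORT B =====
-- Source B's 'score' of a run of length ln
def pbbScore (target_min target_max ln : Int) : Int × Int :=
  if ln < target_min then (target_min - ln, -ln)
  else if ln > target_max then (ln - target_max, -ln)
  else (0, -ln)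

-- Source B's 'better': run of length ln strictly beats the best (start,len) so far (Python tuple '<' is lexicographic)
def pbbBetter (target_min target_max : Int) (ln : Int) (best : Option (Int × Int)) : Bool :=
  match best with
  | none => true
  | some b =>
    let s := pbbScore target_min target_max ln
    let t := pbbScore target_min target_max b.2
    decide (s.1 < t.1) || (decide (s.1 = t.1) && decide (s.2 < t.2))

-- Source B's loop body: state = (best, start, length) of the current run
def pbbStepB (target_min target_max : Int) (st : Option (Int × Int) × Int × Int) (j : Int) :
    Option (Int × Int) × Int × Int :=
  if j = st.2.1 + st.2.2 then (st.1, st.2.1, st.2.2 + 1)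
  else ((if pbbBetter target_min target_max st.2.2 st.1 then some (st.2.1, st.2.2) else st.1), j, 1)

def pick_best_block_py_alt (candidate_cols : List Int) (target_min : Int) (target_max : Int) : List Int :=
  match candidate_cols with
  | [] => []
  | c0 :: rest =>
    let st := rest.foldl (pbbStepB target_min target_max) ((none : Option (Int × Int)), c0, 1)
    let best := if pbbBetter target_min target_max st.2.2 st.1 then some (st.2.1, st.2.2) else st.1
    let b := best.getD (0, 0)
    let block := PySem.List.pyRange b.1 (b.1 + b.2) 1
    if b.2 > target_max then PySem.List.slice block none (some target_max)
    else block

-- ===== PRECONDITION & SPEC =====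
def Spec_pick_best_block_py (candidate_cols : List Int) (target_min : Int) (target_max : Int) (out : List Int) : Prop := out = pick_best_block_py_alt candidate_cols target_min target_max
instance (candidate_cols : List Int) (target_min : Int) (target_max : Int) (out : List Int) : Decidable (Spec_pick_best_block_py candidate_cols target_min target_max out) := by unfold Spec_pick_best_block_py; infer_instance

-- ===== CLAIM (what is proved, stated in full; the proofs are below) =====
def Claim_equal_pick_best_block_py : Prop := ∀ (candidate_cols : List Int) (target_min : Int) (target_max : Int), Dom_pick_best_block_py candidate_cols target_min target_max → Spec_pick_best_block_py candidate_cols target_min target_max (pick_best_block_py candidate_cols target_min target_max)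

-- ===== LEMMAS AND PROOFS =====

def pbbBlk (s ln : Int) : List Int := PySem.List.pyRange s (s + ln) 1
def pbbRuns (s ln : Int) : List Int → List (Int × Int)
  | [] => [(s, ln)]
  | j :: t => if j = s + ln then pbbRuns s (ln + 1) t else (s, ln) :: pbbRuns j 1 t
def pbbFirstMin {α : Type} (before : α → α → Bool) (o : Option α) (xs : List α) : Option α :=
  xs.foldl (fun o x => match o with | none => some x | some m => if before x m then some x else some m) o
def pbbStepRun (target_min target_max : Int) (b : Option (Int × Int)) (p : Int × Int) : Option (Int × Int) :=
  if pbbBetter target_min target_max p.2 b then some p else b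

theorem pbbBlk_length (s ln : Int) : ((pbbBlk s ln).length : Int) = max ln 0 := by
  simp [pbbBlk, PySem.List.length_pyRange_one]
theorem pbbBlk_one (s : Int) : pbbBlk s 1 = [s] := PySem.List.pyRange_one_singleton s
theorem pbbBlk_append (s ln : Int) (h : 0 ≤ ln) :
    pbbBlk s ln ++ [s + ln] = pbbBlk s (ln + 1) := by
  unfold pbbBlk
  rw [show s + (ln + 1) = (s + ln) + 1 by ring,
    PySem.List.pyRange_one_succ_right (by omega)]
theorem pbbBlk_getLast? (s ln : Int) (h : 1 ≤ ln) :
    (pbbBlk s ln).getLast? = some (s + ln - 1) := by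
  rw [show ln = (ln - 1) + 1 by ring, show s + (ln - 1 + 1) - 1 = s + (ln - 1) by ring,
    ← pbbBlk_append s (ln - 1) (by omega), List.getLast?_concat]

theorem pbbRuns_pos (rest : List Int) : ∀ (s ln : Int), 1 ≤ ln →
    ∀ p ∈ pbbRuns s ln rest, 1 ≤ p.2 := by
  induction rest with
  | nil => intro s ln h p hp; simp [pbbRuns] at hp; subst hp; exact h
  | cons j t ih =>
    intro s ln h p hp
    by_cases hj : j = s + ln
    · exact ih s (ln + 1) (by omega) p (by simpa [pbbRuns, hj] using hp)
    · simp only [pbbRuns, if_neg hj, List.mem_cons] at hp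
      rcases hp with h1 | h1
      · simp [h1]; omega
      · exact ih j 1 le_rfl p h1

theorem foldA_runs (rest : List Int) : ∀ (B0 : List (List Int)) (s ln : Int), 1 ≤ ln →
    (rest.foldl pbbStepA (B0, pbbBlk s ln)).1 ++ [(rest.foldl pbbStepA (B0, pbbBlk s ln)).2]
      = B0 ++ (pbbRuns s ln rest).map (fun p => pbbBlk p.1 p.2) := by
  induction rest with
  | nil => intro B0 s ln h; simp [pbbRuns]
  | cons j t ih =>
    intro B0 s ln h
    have hstep : pbbStepA (B0, pbbBlk s ln) j =
        if j = s + ln then (B0, pbbBlk s (ln + 1)) else (B0 ++ [pbbBlk s ln], pbbBlk j 1) := by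
      unfold pbbStepA
      rw [PySem.List.pyGet?_neg_one, pbbBlk_getLast? s ln h]
      simp only [Option.getD_some]
      by_cases hj : j = s + ln
      · subst hj
        rw [if_pos (by omega), if_pos rfl, pbbBlk_append s ln (by omega)]
      · rw [if_neg (by omega), if_neg hj, pbbBlk_one]
    rw [List.foldl_cons, hstep]
    by_cases hj : j = s + ln
    · rw [if_pos hj, ih B0 s (ln + 1) (by omega)]
      simp [pbbRuns, hj]
    · rw [if_neg hj, ih (B0 ++ [pbbBlk s ln]) j 1 le_rfl]
      simp [pbbRuns, hj]

theorem foldB_runs (target_min target_max : Int) (rest : List Int) :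
    ∀ (b : Option (Int × Int)) (s ln : Int),
    (if pbbBetter target_min target_max
          (rest.foldl (pbbStepB target_min target_max) (b, s, ln)).2.2
          (rest.foldl (pbbStepB target_min target_max) (b, s, ln)).1
      then some ((rest.foldl (pbbStepB target_min target_max) (b, s, ln)).2.1,
                 (rest.foldl (pbbStepB target_min target_max) (b, s, ln)).2.2)
      else (rest.foldl (pbbStepB target_min target_max) (b, s, ln)).1)
      = (pbbRuns s ln rest).foldl (pbbStepRun target_min target_max) b := by
  induction rest with
  | nil => intro b s ln; simp [pbbRuns, pbbStepRun]
  | cons j t ih =>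
    intro b s ln
    rw [List.foldl_cons]
    by_cases hj : j = s + ln
    · rw [show pbbStepB target_min target_max (b, s, ln) j = (b, s, ln + 1) by
        unfold pbbStepB; rw [if_pos hj]]
      rw [ih b s (ln + 1)]
      simp [pbbRuns, hj]
    · rw [show pbbStepB target_min target_max (b, s, ln) j =
          ((if pbbBetter target_min target_max ln b then some (s, ln) else b), j, 1) by
        unfold pbbStepB; rw [if_neg hj]]
      rw [ih _ j 1]
      simp only [pbbRuns, if_neg hj, List.foldl_cons]
      rfl

theorem head?_insertBy {α : Type} (before : α → α → Bool) (x : α) (acc : List α) :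
    (PySem.List.insertBy before x acc).head?
      = match acc.head? with
        | none => some x
        | some m => if before x m then some x else some m := by
  cases acc with
  | nil => simp [PySem.List.insertBy]
  | cons a t =>
    by_cases h : before x a <;> simp [PySem.List.insertBy, h]

theorem head?_foldl_insertBy {α : Type} (before : α → α → Bool) (xs : List α) :
    ∀ (acc : List α),
    (xs.foldl (fun a x => PySem.List.insertBy before x a) acc).head?
      = pbbFirstMin before acc.head? xs := by
  induction xs with
  | nil => intro acc; simp [pbbFirstMin]
  | cons x t ih =>
    intro acc
    rw [List.foldl_cons, ih, head?_insertBy]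
    simp only [pbbFirstMin, List.foldl_cons]

theorem pbbScoreBlk_blk (target_min target_max s ln : Int) (h : 1 ≤ ln) :
    pbbScoreBlk target_min target_max (pbbBlk s ln) = pbbScore target_min target_max ln := by
  have hl := pbbBlk_length s ln
  simp only [pbbScoreBlk, pbbScore]
  rw [show ((pbbBlk s ln).length : Int) = ln by omega]
  split_ifs <;> rfl

def pbbLt (target_min target_max : Int) (a b : List Int) : Bool :=
  decide ((pbbScoreBlk target_min target_max a).1 < (pbbScoreBlk target_min target_max b).1)
  || (!decide ((pbbScoreBlk target_min target_max b).1 < (pbbScoreBlk target_min target_max a).1)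
      && decide ((pbbScoreBlk target_min target_max a).2 < (pbbScoreBlk target_min target_max b).2))

theorem pbbLt_blk (target_min target_max s1 l1 s2 l2 : Int) (h1 : 1 ≤ l1) (h2 : 1 ≤ l2) :
    pbbLt target_min target_max (pbbBlk s1 l1) (pbbBlk s2 l2)
      = pbbBetter target_min target_max l1 (some (s2, l2)) := by
  unfold pbbLt pbbBetter
  rw [pbbScoreBlk_blk target_min target_max s1 l1 h1, pbbScoreBlk_blk target_min target_max s2 l2 h2]
  simp only []
  by_cases ha : (pbbScore target_min target_max l1).1 < (pbbScore target_min target_max l2).1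
  · simp [ha]
  · by_cases hb : (pbbScore target_min target_max l2).1 < (pbbScore target_min target_max l1).1
    · simp [ha, hb]; omega
    · simp [ha, hb]; omega

theorem firstMin_runs (target_min target_max : Int) (runs : List (Int × Int)) :
    ∀ (ob : Option (Int × Int)), (∀ p ∈ runs, 1 ≤ p.2) → (∀ p, ob = some p → 1 ≤ p.2) →
    pbbFirstMin (pbbLt target_min target_max)
      (ob.map (fun p => pbbBlk p.1 p.2)) (runs.map (fun p => pbbBlk p.1 p.2))
      = ((runs.foldl (pbbStepRun target_min target_max) ob).map (fun p => pbbBlk p.1 p.2)) := by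
  induction runs with
  | nil => intro ob hp hob; simp [pbbFirstMin]
  | cons p rs ih =>
    intro ob hp hob
    have hp1 : 1 ≤ p.2 := hp p (by simp)
    have hrs : ∀ q ∈ rs, 1 ≤ q.2 := fun q hq => hp q (by simp [hq])
    have hob' : ∀ q, pbbStepRun target_min target_max ob p = some q → 1 ≤ q.2 := by
      intro q hq; unfold pbbStepRun at hq; split at hq
      · cases hq; exact hp1
      · exact hob q hq
    have key := ih (pbbStepRun target_min target_max ob p) hrs hob'
    simp only [List.map_cons, pbbFirstMin, List.foldl_cons] at key ⊢
    cases ob with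
    | none =>
      rw [show pbbStepRun target_min target_max none p = some p by
        simp [pbbStepRun, pbbBetter]] at key ⊢
      exact key
    | some m =>
      have hm : 1 ≤ m.2 := hob m rfl
      rw [show pbbStepRun target_min target_max (some m) p
          = (if pbbBetter target_min target_max p.2 (some m) then some p else some m) from rfl] at key ⊢
      simp only [Option.map_some] at key ⊢
      simp only [pbbLt_blk target_min target_max p.1 p.2 m.1 m.2 hp1 hm]
      by_cases hb : pbbBetter target_min target_max p.2 (some m)
      · simp only [if_pos hb] at key ⊢; exact key
      · simp only [if_neg hb] at key ⊢
        exact key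

theorem stepRun_pos (target_min target_max : Int) (runs : List (Int × Int)) :
    ∀ (ob : Option (Int × Int)), (∀ p ∈ runs, 1 ≤ p.2) → (∀ p, ob = some p → 1 ≤ p.2) →
    ∀ p, runs.foldl (pbbStepRun target_min target_max) ob = some p → 1 ≤ p.2 := by
  induction runs with
  | nil => intro ob hp hob p hfold; exact hob p hfold
  | cons q rs ih =>
    intro ob hp hob p hfold
    rw [List.foldl_cons] at hfold
    refine ih (pbbStepRun target_min target_max ob q) (fun r hr => hp r (by simp [hr])) ?_ p hfold
    intro r hr
    unfold pbbStepRun at hr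
    split at hr
    · cases hr; exact hp q (by simp)
    · exact hob r hr

theorem main_eq (cc : List Int) (tmin tmax : Int) :
    pick_best_block_py cc tmin tmax = pick_best_block_py_alt cc tmin tmax := by
  cases cc with
  | nil => rfl
  | cons c0 rest =>
    simp only [pick_best_block_py, pick_best_block_py_alt]
    rw [show ([c0] : List Int) = pbbBlk c0 1 from (pbbBlk_one c0).symm]
    rw [foldB_runs tmin tmax rest none c0 1]
    have hA := foldA_runs rest [] c0 1 le_rfl
    rw [hA]
    have hsorted : PySem.List.sorted2 ([] ++ (pbbRuns c0 1 rest).map (fun p => pbbBlk p.1 p.2))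
        (fun b => (pbbScoreBlk tmin tmax b).1) (fun b => (pbbScoreBlk tmin tmax b).2)
        = ((pbbRuns c0 1 rest).map (fun p => pbbBlk p.1 p.2)).foldl
            (fun acc x => PySem.List.insertBy (pbbLt tmin tmax) x acc) [] := rfl
    rw [hsorted]
    rw [show PySem.List.pyGet? (((pbbRuns c0 1 rest).map (fun p => pbbBlk p.1 p.2)).foldl
            (fun acc x => PySem.List.insertBy (pbbLt tmin tmax) x acc) []) 0
        = (((pbbRuns c0 1 rest).map (fun p => pbbBlk p.1 p.2)).foldl
            (fun acc x => PySem.List.insertBy (pbbLt tmin tmax) x acc) []).head? from by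
      rw [PySem.List.pyGet?_zero, List.head?_eq_getElem?]]
    rw [head?_foldl_insertBy (pbbLt tmin tmax) _ []]
    have hpos := pbbRuns_pos rest c0 1 le_rfl
    rw [show (([] : List (List Int)).head?) = Option.map (fun p : Int × Int => pbbBlk p.1 p.2) none from rfl]
    rw [firstMin_runs tmin tmax (pbbRuns c0 1 rest) none hpos (by intro p h; cases h)]
    cases hR : (pbbRuns c0 1 rest).foldl (pbbStepRun tmin tmax) none with
    | none =>
      simp only [Option.map_none, Option.getD_none, Option.getD_none]
      rw [show PySem.List.pyRange 0 (0 + (0:Int)) 1 = [] from by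
        exact PySem.List.pyRange_one_eq_nil (by omega)]
      simp
    | some b =>
      obtain ⟨bs, bl⟩ := b
      have hbl : 1 ≤ bl := stepRun_pos tmin tmax (pbbRuns c0 1 rest) none hpos
        (by intro p h; cases h) (bs, bl) hR
      simp only [Option.map_some, Option.getD_some]
      have hlen : ((pbbBlk bs bl).length : Int) = bl := by
        have := pbbBlk_length bs bl; omega
      rw [hlen]
      rfl

-- ===== VERDICT (by name: the statement is the Claim_ definition above) =====
theorem pick_best_block_py_spec : Claim_equal_pick_best_block_py := by
  intro candidate_cols target_min target_max _
  unfold Spec_pick_best_block_py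
  exact main_eq candidate_cols target_min target_max
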